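-- pv_equiv track=rewrite | github.com/ribartra/Tesis-Resultados | Resultado1-completo/load_and_check.py | merge_unbalanced_parentheses
-- ===== SOURCE A (Python) =====
-- def merge_unbalanced_parentheses(paragraphs: list[str]) -> list[str]:
--     merged, buf, balance = [], None, 0
--
--     for p in paragraphs:
--         opens = p.count("(")
--         closes = p.count(")")
--         if buf is None:
--             # inicio de posible párrafo partido
--             if opens > closes:
--                 buf = p
--                 balance = opens - closes
--             else:
--                 merged.append(p)
--         else:
--             # seguimos juntando
--             buf += " " + p
--             balance += opens - closes
--             if balance <= 0:
--                 # cerramos el buffer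
--                 merged.append(buf)
--                 buf = None
--                 balance = 0
--
--     # si quedó algo sin cerrar, lo agregamos
--     if buf is not None:
--         merged.append(buf)
--
--     return merged
-- ===== SOURCE B (Python) =====
-- def merge_unbalanced_parentheses(paragraphs: list[str]) -> list[str]:
--     # Two-stage approach via prefix sums: first compute the running paren
--     # balance prefix[i] after paragraph i.  A group that starts right after
--     # position with prefix value `base` ends at the first index i whose
--     # prefix sum has dropped back to `base` or below (or at the last index).
--     prefix = []
--     s = 0
--     for p in paragraphs:
--         s += p.count("(") - p.count(")")
--         prefix.append(s)
--     result = []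
--     start, base = 0, 0
--     n = len(paragraphs)
--     while start < n:
--         end = start
--         while end < n - 1 and prefix[end] > base:
--             end += 1
--         result.append(" ".join(paragraphs[start:end + 1]))
--         base = prefix[end]
--         start = end + 1
--     return result
-- ===== Notes on version B (the rewrite author's own statement) =====
-- stated objective: alternative
-- what changed: Replaces A's single-pass state machine (Optional buffer + balance threaded through one loop plus a trailing flush) by a two-stage algorithm: stage 1 computes the prefix-sum array of paren balances; stage 2 scans indices, cutting each group at the first position whose prefix sum falls back to the group's base value (or the last index) and emitting ' '.join of that slice; no buffer or balance state is carried and no final flush exists.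
import Mathlib
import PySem

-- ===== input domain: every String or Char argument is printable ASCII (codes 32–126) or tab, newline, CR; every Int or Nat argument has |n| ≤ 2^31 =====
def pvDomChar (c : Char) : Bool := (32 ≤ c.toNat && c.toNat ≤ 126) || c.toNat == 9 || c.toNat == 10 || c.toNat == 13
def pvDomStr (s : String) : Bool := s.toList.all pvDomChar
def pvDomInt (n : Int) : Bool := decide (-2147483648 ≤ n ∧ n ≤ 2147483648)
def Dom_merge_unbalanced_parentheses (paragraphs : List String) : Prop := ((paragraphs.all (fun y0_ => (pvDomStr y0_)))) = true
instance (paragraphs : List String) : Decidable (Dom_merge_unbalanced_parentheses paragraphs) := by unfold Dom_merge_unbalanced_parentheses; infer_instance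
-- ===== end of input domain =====

-- B replaces A's single-pass buffer/balance state machine by a two-stage algorithm: first a pass computing the prefix-sum balance array, then an index scan that cuts groups where the prefix sum falls back to the group's base and joins each slice; alternative decomposition, same cost.


-- ===== PORT A =====
-- A (port): flat fold carrying (merged, optional buffer, balance), with a final flush of the buffer.
def pvStepA (st : List String × Option String × Int) (p : String) : List String × Option String × Int :=
  let opens : Int := PySem.Str.count p "("
  let closes : Int := PySem.Str.count p ")"
  match st with
  | (merged, none, balance) =>
    if opens > closes then (merged, some p, opens - closes)
    else (merged ++ [p], none, balance)
  | (merged, some buf, balance) =>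
    let buf := buf ++ " " ++ p
    let balance := balance + (opens - closes)
    if balance ≤ 0 then (merged ++ [buf], none, 0)
    else (merged, some buf, balance)

def merge_unbalanced_parentheses (paragraphs : List String) : List String :=
  let st := paragraphs.foldl pvStepA ([], none, 0)
  match st.2.1 with
  | some buf => st.1 ++ [buf]
  | none => st.1

-- ===== PORT B =====
-- B (port): stage 1 — the running paren-balance prefix array, built by a fold like Source B's first loop.
def pvDelta (p : String) : Int :=
  (PySem.Str.count p "(" : Int) - (PySem.Str.count p ")" : Int)

def pvPrefixStep (st : List Int × Int) (p : String) : List Int × Int :=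
  let s := st.2 + pvDelta p
  (st.1 ++ [s], s)

def pvPrefix (paragraphs : List String) : List Int :=
  (paragraphs.foldl pvPrefixStep ([], 0)).1

-- B (port): stage 2 inner while-loop — advance `end` while end < n-1 and prefix[end] > base.
-- (prefix[end] is in range under the guard e < n - 1, so getD is exact here.)
def pvFindEnd (pre : List Int) (n : Nat) (base : Int) (e : Nat) : Nat :=
  if h : e < n - 1 ∧ base < pre.getD e 0 then pvFindEnd pre n base (e + 1) else e
  termination_by n - 1 - e
  decreasing_by have := h.1; omega

theorem pvFindEnd_ge (pre : List Int) (n : Nat) (base : Int) :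
    ∀ m e, n - 1 - e = m → e ≤ pvFindEnd pre n base e := by
  intro m
  induction m using Nat.strong_induction_on with
  | _ m ih =>
    intro e hm
    rw [pvFindEnd]
    split
    · rename_i h
      have h1 := ih (n - 1 - (e + 1)) (by omega) (e + 1) rfl
      omega
    · exact Nat.le_refl e

-- B (port): stage 2 outer while-loop over start indices; each group is " ".join(paragraphs[start:end+1]).
-- (Source B's local `end` = pvFindEnd …; inlined at its three use sites)
def pvOuter (paragraphs : List String) (pre : List Int) (n : Nat) (start : Nat) (base : Int) : List String :=
  if h : start < n then
    PySem.Str.join " " (PySem.List.slice paragraphs (some (start : Int))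
        (some ((pvFindEnd pre n base start : Int) + 1)))
      :: pvOuter paragraphs pre n (pvFindEnd pre n base start + 1) (pre.getD (pvFindEnd pre n base start) 0)
  else []
  termination_by n - start
  decreasing_by have := pvFindEnd_ge pre n base (n - 1 - start) start rfl; omega

def merge_unbalanced_parentheses_alt (paragraphs : List String) : List String :=
  pvOuter paragraphs (pvPrefix paragraphs) paragraphs.length 0 0

-- ===== PRECONDITION & SPEC =====
def Spec_merge_unbalanced_parentheses (paragraphs : List String) (out : List String) : Prop := out = merge_unbalanced_parentheses_alt paragraphs
instance (paragraphs : List String) (out : List String) : Decidable (Spec_merge_unbalanced_parentheses paragraphs out) := by unfold Spec_merge_unbalanced_parentheses; infer_instance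

-- ===== CLAIM (what is proved, stated in full; the proofs are below) =====
def Claim_equal_merge_unbalanced_parentheses : Prop := ∀ (paragraphs : List String), Dom_merge_unbalanced_parentheses paragraphs → Spec_merge_unbalanced_parentheses paragraphs (merge_unbalanced_parentheses paragraphs)

-- ===== LEMMAS AND PROOFS =====

-- Common reference spec: group-at-a-time recursion (pvCollect consumes one unbalanced group).
def pvCollect : List String → String → Int → String × List String
  | [], buf, _ => (buf, [])
  | q :: rest, buf, bal =>
    if 0 < bal then pvCollect rest (buf ++ " " ++ q) (bal + pvDelta q)
    else (buf, q :: rest)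

theorem pvCollect_len (l : List String) : ∀ buf bal, (pvCollect l buf bal).2.length ≤ l.length := by
  induction l with
  | nil => intro buf bal; simp [pvCollect]
  | cons q rest ih =>
    intro buf bal
    simp only [pvCollect]
    split
    · exact Nat.le_trans (ih _ _) (Nat.le_succ _)
    · simp

def pvSpec : List String → List String
  | [] => []
  | p :: rest =>
    if pvDelta p ≤ 0 then p :: pvSpec rest
    else
      let r := pvCollect rest p (pvDelta p)
      r.1 :: pvSpec r.2
  termination_by l => l.length
  decreasing_by
  · simp
  · simpa using Nat.lt_succ_of_le (pvCollect_len rest p (pvDelta p))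

-- ---- A = pvSpec ----
def pvFinA (st : List String × Option String × Int) : List String :=
  match st.2.1 with
  | some buf => st.1 ++ [buf]
  | none => st.1

theorem pvCollect_nonpos (l : List String) (buf : String) (bal : Int) (h : bal ≤ 0) :
    pvCollect l buf bal = (buf, l) := by
  cases l with
  | nil => simp [pvCollect]
  | cons q rest => simp [pvCollect, h]

theorem pvCombo : ∀ n (l : List String), l.length = n →
    (∀ (m : List String) (b : Int),
      pvFinA (List.foldl pvStepA (m, none, b) l) = m ++ pvSpec l) ∧
    (∀ (m : List String) (buf : String) (bal : Int), 0 < bal →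
      pvFinA (List.foldl pvStepA (m, some buf, bal) l)
        = m ++ (pvCollect l buf bal).1 :: pvSpec (pvCollect l buf bal).2) := by
  intro n
  induction n using Nat.strong_induction_on with
  | _ n ih =>
    intro l hl
    constructor
    · intro m b
      cases l with
      | nil => simp [pvFinA, pvSpec]
      | cons p rest =>
        simp only [List.foldl_cons, pvStepA]
        by_cases hc : (PySem.Str.count p "(" : Int) > (PySem.Str.count p ")" : Int)
        · have hne : ¬ pvDelta p ≤ 0 := by unfold pvDelta; omega
          have h2 := (ih rest.length (by simp at hl; omega) rest rfl).2 m p (pvDelta p) (by unfold pvDelta; omega)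
          simp only [if_pos hc]
          rw [show ((PySem.Str.count p "(" : Int) - (PySem.Str.count p ")" : Int)) = pvDelta p from rfl] at *
          rw [h2, pvSpec]
          simp [hne]
        · have hle : pvDelta p ≤ 0 := by unfold pvDelta; omega
          have h1 := (ih rest.length (by simp at hl; omega) rest rfl).1 (m ++ [p]) b
          simp only [if_neg hc]
          rw [h1, pvSpec]
          simp [hle]
    · intro m buf bal hbal
      cases l with
      | nil =>
        simp [pvFinA, pvCollect, pvSpec]
      | cons q rest =>
        simp only [List.foldl_cons, pvStepA]
        have hcq : pvCollect (q :: rest) buf bal = pvCollect rest (buf ++ " " ++ q) (bal + pvDelta q) := by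
          simp [pvCollect, hbal]
        by_cases hz : bal + ((PySem.Str.count q "(" : Int) - (PySem.Str.count q ")" : Int)) ≤ 0
        · have hz' : bal + pvDelta q ≤ 0 := hz
          have h1 := (ih rest.length (by simp at hl; omega) rest rfl).1 (m ++ [buf ++ " " ++ q]) 0
          simp only [if_pos hz]
          rw [h1, hcq, pvCollect_nonpos rest _ _ hz']
          simp
        · have hz' : 0 < bal + pvDelta q := by unfold pvDelta; omega
          have h2 := (ih rest.length (by simp at hl; omega) rest rfl).2 m (buf ++ " " ++ q) (bal + pvDelta q) hz'
          simp only [if_neg hz]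
          rw [show (bal + ((PySem.Str.count q "(" : Int) - (PySem.Str.count q ")" : Int))) = bal + pvDelta q from rfl]
          rw [h2, hcq]

-- ---- B = pvSpec ----

-- prefix-sum abbreviations
def pvPresum (P : List String) (m : Nat) : Int := ((P.take m).map pvDelta).sum

def pvScan : List String → Int → List Int
  | [], _ => []
  | p :: rest, s => (s + pvDelta p) :: pvScan rest (s + pvDelta p)

theorem foldl_pvPrefixStep (l : List String) :
    ∀ acc s, (l.foldl pvPrefixStep (acc, s)).1 = acc ++ pvScan l s := by
  induction l with
  | nil => intro acc s; simp [pvScan]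
  | cons p rest ih =>
    intro acc s
    simp only [List.foldl_cons, pvPrefixStep, pvScan]
    rw [ih]
    simp

theorem pvScan_getD : ∀ (l : List String) (s : Int) (k : Nat), k < l.length →
    (pvScan l s).getD k 0 = s + ((l.take (k + 1)).map pvDelta).sum := by
  intro l
  induction l with
  | nil => intro s k h; simp at h
  | cons p rest ih =>
    intro s k h
    cases k with
    | zero => simp [pvScan]
    | succ k =>
      simp only [pvScan, List.getD_cons_succ, List.take_succ_cons, List.map_cons, List.sum_cons]
      rw [ih (s + pvDelta p) k (by simpa using h)]
      ring

theorem pvPrefix_getD (P : List String) (k : Nat) (h : k < P.length) :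
    (pvPrefix P).getD k 0 = pvPresum P (k + 1) := by
  unfold pvPrefix pvPresum
  rw [foldl_pvPrefixStep]
  simpa using pvScan_getD P 0 k h

theorem pvPresum_succ (P : List String) (k : Nat) (h : k < P.length) :
    pvPresum P (k + 1) = pvPresum P k + pvDelta P[k] := by
  have h1 : P.take (k + 1) = P.take k ++ [P[k]] := by
    rw [List.take_add_one, List.getElem?_eq_getElem h]
    rfl
  unfold pvPresum
  rw [h1, List.map_append, List.sum_append]
  simp

-- the joined slice P[a:b]
def pvJoin (P : List String) (a b : Nat) : String :=
  PySem.Str.join " " ((P.drop a).take (b - a))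

theorem chars_join_snoc (sep : List Char) :
    ∀ (l : List (List Char)) (q : List Char), l ≠ [] →
    PySem.Chars.join sep (l ++ [q]) = PySem.Chars.join sep l ++ sep ++ q := by
  intro l
  induction l with
  | nil => intro q h; exact absurd rfl h
  | cons a t ih =>
    intro q _
    cases t with
    | nil => simp [PySem.Chars.join_cons_cons, PySem.Chars.join_singleton]
    | cons b t' =>
      have hih := ih q (by simp)
      rw [show (a :: b :: t') ++ [q] = a :: b :: (t' ++ [q]) from rfl,
        PySem.Chars.join_cons_cons, PySem.Chars.join_cons_cons,
        show (b : List Char) :: (t' ++ [q]) = (b :: t') ++ [q] from rfl, hih]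
      simp

theorem str_join_snoc (xs : List String) (q : String) (h : xs ≠ []) :
    PySem.Str.join " " (xs ++ [q]) = PySem.Str.join " " xs ++ " " ++ q := by
  apply String.toList_injective
  simp only [PySem.Str.toList_join, String.toList_append, List.map_append, List.map_cons,
    List.map_nil]
  exact chars_join_snoc " ".toList (xs.map String.toList) q.toList (by simpa using h)

theorem str_join_singleton (p : String) : PySem.Str.join " " [p] = p := by
  apply String.toList_injective
  simp [PySem.Str.toList_join, PySem.Chars.join_singleton]

theorem pvJoin_single (P : List String) (a : Nat) (h : a < P.length) :
    pvJoin P a (a + 1) = P[a] := by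
  unfold pvJoin
  rw [show a + 1 - a = 1 from by omega, List.take_one]
  rw [show (P.drop a).head? = some P[a] from by
    rw [List.head?_drop]; exact List.getElem?_eq_getElem h]
  exact str_join_singleton _

theorem pvJoin_snoc (P : List String) (a k : Nat) (ha : a ≤ k) (hk : k + 1 < P.length) :
    pvJoin P a (k + 2) = pvJoin P a (k + 1) ++ " " ++ P[k + 1] := by
  unfold pvJoin
  have h1 : (P.drop a).take (k + 2 - a) = (P.drop a).take (k + 1 - a) ++ [P[k + 1]] := by
    have hlen : k + 1 - a < (P.drop a).length := by simp; omega
    have hidx : a + (k + 1 - a) = k + 1 := by omega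
    rw [show k + 2 - a = (k + 1 - a) + 1 from by omega, List.take_add_one,
      List.getElem?_eq_getElem hlen]
    simp [hidx]
  rw [h1]
  apply str_join_snoc
  have : ((P.drop a).take (k + 1 - a)).length = k + 1 - a := by simp; omega
  intro hc
  rw [hc] at this
  simp at this
  omega

-- the inner loop consumes exactly one pvCollect group
theorem pvCollect_find (P : List String) (start : Nat) :
    ∀ (m k : Nat), P.length - 1 - k = m → start ≤ k → k < P.length →
    pvCollect (P.drop (k + 1)) (pvJoin P start (k + 1)) (pvPresum P (k + 1) - pvPresum P start)
      = (pvJoin P start (pvFindEnd (pvPrefix P) P.length (pvPresum P start) k + 1),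
         P.drop (pvFindEnd (pvPrefix P) P.length (pvPresum P start) k + 1)) := by
  intro m
  induction m using Nat.strong_induction_on with
  | _ m ih =>
    intro k hm hsk hk
    rw [pvFindEnd]
    by_cases h : k < P.length - 1 ∧ pvPresum P start < (pvPrefix P).getD k 0
    · rw [dif_pos h]
      have hk1 : k + 1 < P.length := by omega
      have hbal : 0 < pvPresum P (k + 1) - pvPresum P start := by
        have := pvPrefix_getD P k hk
        omega
      have hdrop : P.drop (k + 1) = P[k + 1] :: P.drop (k + 2) := by
        rw [List.drop_eq_getElem_cons hk1]
      rw [hdrop]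
      simp only [pvCollect, if_pos hbal]
      have hbuf : pvJoin P start (k + 1) ++ " " ++ P[k + 1] = pvJoin P start (k + 2) :=
        (pvJoin_snoc P start k hsk hk1).symm
      have hbal2 : pvPresum P (k + 1) - pvPresum P start + pvDelta P[k + 1]
          = pvPresum P (k + 2) - pvPresum P start := by
        have h3 := pvPresum_succ P (k + 1) hk1
        rw [show k + 1 + 1 = k + 2 from by omega] at h3
        omega
      rw [hbuf, hbal2]
      have hI := ih (P.length - 1 - (k + 1)) (by omega) (k + 1) rfl (by omega) hk1
      rw [show k + 1 + 1 = k + 2 from by omega] at hI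
      exact hI
    · rw [dif_neg h]
      by_cases hb : pvPresum P (k + 1) - pvPresum P start ≤ 0
      · exact pvCollect_nonpos _ _ _ hb
      · have hk1 : P.length ≤ k + 1 := by
          have := pvPrefix_getD P k hk
          by_contra hc
          exact h ⟨by omega, by omega⟩
        rw [List.drop_eq_nil_of_le hk1]
        simp [pvCollect]

theorem pvFindEnd_lt (pre : List Int) (n : Nat) (base : Int) :
    ∀ m e, n - 1 - e = m → e < n → pvFindEnd pre n base e < n := by
  intro m
  induction m using Nat.strong_induction_on with
  | _ m ih =>
    intro e hm he
    rw [pvFindEnd]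
    split
    · rename_i h
      exact ih (n - 1 - (e + 1)) (by omega) (e + 1) rfl (by omega)
    · exact he

theorem pvOuter_eq (P : List String) :
    ∀ (m start : Nat), P.length - start = m →
    pvOuter P (pvPrefix P) P.length start (pvPresum P start) = pvSpec (P.drop start) := by
  intro m
  induction m using Nat.strong_induction_on with
  | _ m ih =>
    intro start hm
    rw [pvOuter]
    by_cases hs : start < P.length
    · rw [dif_pos hs]
      have hdrop : P.drop start = P[start] :: P.drop (start + 1) := by
        rw [List.drop_eq_getElem_cons hs]
      have hslice : PySem.List.slice P (some (start : Int))
          (some ((pvFindEnd (pvPrefix P) P.length (pvPresum P start) start : Int) + 1))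
          = (P.drop start).take (pvFindEnd (pvPrefix P) P.length (pvPresum P start) start + 1 - start) := by
        rw [show ((pvFindEnd (pvPrefix P) P.length (pvPresum P start) start : Int) + 1)
            = ((pvFindEnd (pvPrefix P) P.length (pvPresum P start) start + 1 : Nat) : Int) from by push_cast; ring]
        exact PySem.List.slice_natCast P start _
      by_cases hd : pvDelta P[start] ≤ 0
      · have hend : pvFindEnd (pvPrefix P) P.length (pvPresum P start) start = start := by
          rw [pvFindEnd]
          rw [dif_neg]
          intro hcon
          have h1 := pvPrefix_getD P start hs
          have h2 := pvPresum_succ P start hs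
          omega
        rw [hend] at hslice ⊢
        have hgd : (pvPrefix P).getD start 0 = pvPresum P (start + 1) := pvPrefix_getD P start hs
        rw [hgd, ih (P.length - (start + 1)) (by omega) (start + 1) rfl]
        rw [hdrop, pvSpec, if_pos hd]
        congr 1
        rw [hslice]
        exact pvJoin_single P start hs
      · have hcf := pvCollect_find P start (P.length - 1 - start) start rfl (Nat.le_refl start) hs
        have hpj : pvJoin P start (start + 1) = P[start] := pvJoin_single P start hs
        have hps : pvPresum P (start + 1) - pvPresum P start = pvDelta P[start] := by
          have := pvPresum_succ P start hs
          omega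
        rw [hpj, hps] at hcf
        rw [hdrop, pvSpec, if_neg hd]
        simp only
        rw [hcf]
        have he_lt : pvFindEnd (pvPrefix P) P.length (pvPresum P start) start < P.length :=
          pvFindEnd_lt (pvPrefix P) P.length (pvPresum P start) (P.length - 1 - start) start rfl hs
        have he_ge : start ≤ pvFindEnd (pvPrefix P) P.length (pvPresum P start) start :=
          pvFindEnd_ge (pvPrefix P) P.length (pvPresum P start) (P.length - 1 - start) start rfl
        have hgd : (pvPrefix P).getD (pvFindEnd (pvPrefix P) P.length (pvPresum P start) start) 0
            = pvPresum P (pvFindEnd (pvPrefix P) P.length (pvPresum P start) start + 1) :=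
          pvPrefix_getD P _ he_lt
        rw [hgd, ih (P.length - (pvFindEnd (pvPrefix P) P.length (pvPresum P start) start + 1))
          (by omega) _ rfl]
        congr 1
        rw [hslice]
        rfl
    · rw [dif_neg hs]
      rw [List.drop_eq_nil_of_le (by omega), pvSpec]

-- ===== VERDICT (by name: the statement is the Claim_ definition above) =====
theorem merge_unbalanced_parentheses_spec : Claim_equal_merge_unbalanced_parentheses := by
  intro P _
  unfold Spec_merge_unbalanced_parentheses merge_unbalanced_parentheses merge_unbalanced_parentheses_alt
  have hA := (pvCombo P.length P rfl).1 [] 0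
  have hB := pvOuter_eq P P.length 0 rfl
  have h0 : pvPresum P 0 = 0 := by simp [pvPresum]
  rw [h0] at hB
  rw [hB]
  simpa [pvFinA] using hA
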